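-- pv_equiv track=rewrite | github.com/miliar/Code_Jam_Webscraper | Solutions_python/Problem_53/413.py | check
-- ===== SOURCE A (Python) =====
-- def check(c,k):
-- 	if k == 1:
-- 		if c[k-1] == 0:
-- 			return False
-- 		else:
-- 			return True
-- 	else:
-- 		if c[k-1] == 0:
-- 			return False
-- 		else:
-- 			return check(c,k-1)
-- ===== SOURCE B (Python) =====
-- def check(c, k):
--     return all(x != 0 for x in c[:k])
-- ===== Notes on version B (the rewrite author's own statement) =====
-- stated objective: simpler
-- what changed: Replaces the hand-written recursion that walks c[k-1], c[k-2], ... down to c[0] by a single idiomatic all() over the slice c[:k].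
-- intended difference: On k = 0 with a zero anywhere in c, A's negative-index wraparound walks the list from the back and returns False; B returns True (all of the zero required coefficients are nonzero, vacuously), which is the intended value for k = 0. — e.g. on check([0], 0): A returns false, B returns true
import Mathlib
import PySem

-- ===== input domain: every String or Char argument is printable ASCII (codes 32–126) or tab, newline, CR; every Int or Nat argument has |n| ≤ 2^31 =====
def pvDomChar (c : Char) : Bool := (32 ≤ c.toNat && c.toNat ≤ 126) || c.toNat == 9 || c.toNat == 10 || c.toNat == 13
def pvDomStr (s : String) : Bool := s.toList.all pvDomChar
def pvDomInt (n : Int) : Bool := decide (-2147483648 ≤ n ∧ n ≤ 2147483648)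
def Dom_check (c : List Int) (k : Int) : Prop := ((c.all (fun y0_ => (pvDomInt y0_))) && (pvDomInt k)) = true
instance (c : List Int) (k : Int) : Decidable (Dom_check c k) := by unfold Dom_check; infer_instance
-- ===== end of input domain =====

-- B replaces A's hand-written downward recursion over c[k-1..0] by an idiomatic all() over the
-- slice c[:k] (simpler); on k = 0 with 0 ∈ c this changes A's wraparound False to the intended True (see D_check).

-- ===== PORT A =====
-- A recurses with k decreasing; when the indexing succeeds the (clamped) measure k + len c drops by 1.
def check (c : List Int) (k : Int) : Bool :=
  if k = 1 then
    match PySem.List.pyGet? c (k - 1) with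
    | none => false                     -- c[k-1] raises IndexError (outside Pre_check)
    | some v => if v = 0 then false else true
  else
    match h : PySem.List.pyGet? c (k - 1) with
    | none => false                     -- c[k-1] raises IndexError (outside Pre_check)
    | some v => if v = 0 then false else check c (k - 1)
termination_by (k + c.length).toNat
decreasing_by
  have hin : PySem.Raise.InRange c.length (k - 1) := by
    by_contra hno
    rw [← PySem.List.pyGet?_eq_none_iff] at hno
    simp [hno] at h
  unfold PySem.Raise.InRange at hin
  omega

-- ===== PORT B =====
def check_alt (c : List Int) (k : Int) : Bool :=
  (PySem.List.slice c none (some k)).all (fun x => x != 0)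

-- ===== PRECONDITION & SPEC =====
-- Pre_check is exactly where the Python A returns: either 1 ≤ k ≤ len c (normal descent to c[0]),
-- or k ≤ 0 and the backwards negative-index walk meets a zero before falling off the front.
def Pre_check (c : List Int) (k : Int) : Prop :=
  (1 ≤ k ∧ k ≤ (c.length : Int)) ∨ (k ≤ 0 ∧ (0 : Int) ∈ c.take ((c.length : Int) + k).toNat)
instance (c : List Int) (k : Int) : Decidable (Pre_check c k) := by unfold Pre_check; infer_instance
def pvWitness_check : List Int × Int := ([1, 2], 2)

-- On k = 0 with a zero anywhere in c, A's negative-index wraparound walks the list from the back and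
-- returns False; B returns True (all of the zero required coefficients are nonzero, vacuously), the intended value.
def D_check (c : List Int) (k : Int) : Prop := k = 0 ∧ (0 : Int) ∈ c
instance (c : List Int) (k : Int) : Decidable (D_check c k) := by unfold D_check; infer_instance

def Spec_check (c : List Int) (k : Int) (out : Bool) : Prop := ¬ D_check c k → out = check_alt c k
instance (c : List Int) (k : Int) (out : Bool) : Decidable (Spec_check c k out) := by unfold Spec_check; infer_instance

def pvDiffWitness_check : List Int × Int := ([0], 0)
def pvDiffWitnessOut_check : Bool × Bool := (false, true)

-- ===== CLAIM (what is proved, stated in full; the proofs are below) =====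
def Claim_unchanged_check : Prop := ∀ (c : List Int) (k : Int), Dom_check c k → Pre_check c k → Spec_check c k (check c k)
def Claim_changed_check : Prop := Dom_check (pvDiffWitness_check.1) (pvDiffWitness_check.2) ∧ Pre_check (pvDiffWitness_check.1) (pvDiffWitness_check.2) ∧ D_check (pvDiffWitness_check.1) (pvDiffWitness_check.2) ∧ check (pvDiffWitness_check.1) (pvDiffWitness_check.2) = pvDiffWitnessOut_check.1 ∧ check_alt (pvDiffWitness_check.1) (pvDiffWitness_check.2) = pvDiffWitnessOut_check.2 ∧ pvDiffWitnessOut_check.1 ≠ pvDiffWitnessOut_check.2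
def Claim_exact_check : Prop := ∀ (c : List Int) (k : Int), Dom_check c k → Pre_check c k → D_check c k → check c k ≠ check_alt c k

-- ===== LEMMAS AND PROOFS =====

-- A on 1 ≤ k ≤ len xs computes "every element of the first k is nonzero".
theorem check_pos (n : Nat) (xs : List Int) (h1 : 1 ≤ n) (h2 : n ≤ xs.length) :
    check xs (n : Int) = (xs.take n).all (fun x => x != 0) := by
  induction n with
  | zero => omega
  | succ m ih =>
    by_cases hm : m = 0
    · subst hm
      rcases List.exists_cons_of_ne_nil (List.ne_nil_of_length_pos (by omega) : xs ≠ []) with ⟨a, t, rfl⟩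
      rw [check.eq_def, if_pos (show ((0 + 1 : Nat) : Int) = 1 by norm_num)]
      have hget : PySem.List.pyGet? (a :: t) (((0 + 1 : Nat) : Int) - 1) = some a := by
        have h01 : (((0 + 1 : Nat) : Int) - 1) = (0 : Int) := by norm_num
        rw [h01, PySem.List.pyGet?_zero_cons]
      split
      next h => rw [h] at hget; exact absurd hget (by simp)
      next v h =>
        rw [h] at hget; injection hget with hv; subst hv
        simp only [List.take_succ_cons, List.take_zero, List.all_cons, List.all_nil]
        by_cases ha : v = 0 <;> simp [ha]
    · have hne : ((m + 1 : Nat) : Int) ≠ 1 := by omega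
      have hidx : (((m + 1 : Nat) : Int) - 1) = ((m : Nat) : Int) := by push_cast; ring
      have hget : PySem.List.pyGet? xs (((m + 1 : Nat) : Int) - 1) = some (xs[m]'(by omega)) := by
        rw [hidx, PySem.List.pyGet?_natCast, List.getElem?_eq_getElem (by omega)]
      have htake : xs.take (m + 1) = xs.take m ++ [xs[m]'(by omega)] := by
        rw [List.take_add_one, List.getElem?_eq_getElem (by omega)]; rfl
      rw [check.eq_def, if_neg hne]
      split
      next h => rw [h] at hget; exact absurd hget (by simp)
      next v h =>
        rw [h] at hget; injection hget with hv; subst hv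
        rw [hidx, ih (by omega) (by omega), htake, List.all_append]
        by_cases hz : xs[m]'(by omega) = 0
        · simp [hz]
        · simp [hz, Bool.and_comm]

-- A on k ≤ 0 returns False as soon as the backwards walk meets a zero; m is the number of
-- positions still reachable (len xs + k).
theorem check_neg_zero (m : Nat) : ∀ (xs : List Int) (k : Int), k ≤ 0 →
    ((xs.length : Int) + k).toNat = m → (0 : Int) ∈ xs.take m → check xs k = false := by
  induction m with
  | zero => intro xs k _ _ hmem; simp at hmem
  | succ m ih =>
    intro xs k hk hm hmem
    have hlen : (xs.length : Int) + k = (m : Int) + 1 := by omega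
    have hne : k ≠ 1 := by omega
    have hj : k - 1 = -(((1 - k).toNat : Nat) : Int) := by omega
    have hget : PySem.List.pyGet? xs (k - 1) = some (xs[m]'(by omega)) := by
      rw [hj, PySem.List.pyGet?_neg_natCast xs (1 - k).toNat (by omega) (by omega)]
      have hm' : xs.length - (1 - k).toNat = m := by omega
      rw [hm', List.getElem?_eq_getElem (by omega)]
    have htake : xs.take (m + 1) = xs.take m ++ [xs[m]'(by omega)] := by
      rw [List.take_add_one, List.getElem?_eq_getElem (by omega)]; rfl
    rw [check.eq_def, if_neg hne]
    split
    next h => rw [h] at hget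
    next v h =>
      rw [h] at hget; injection hget with hv; subst hv
      by_cases hz : xs[m]'(by omega) = 0
      · rw [if_pos hz]
      · rw [if_neg hz]
        apply ih xs (k - 1) (by omega) (by omega)
        rw [htake] at hmem
        rcases List.mem_append.1 hmem with h' | h'
        · exact h'
        · simp at h'; exact absurd h'.symm hz

theorem check_spec' : ∀ (xs : List Int) (k : Int), Pre_check xs k → ¬ D_check xs k → check xs k = check_alt xs k := by
  intro xs k hpre hnd
  rcases hpre with ⟨h1, h2⟩ | ⟨hk, hmem⟩
  · -- 1 ≤ k ≤ len xs
    obtain ⟨n, rfl⟩ : ∃ n : Nat, k = (n : Int) := ⟨k.toNat, by omega⟩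
    rw [check_pos n xs (by omega) (by omega), check_alt,
      PySem.List.slice_to xs (by omega : (0:Int) ≤ (n : Int))]
    simp
  · -- k ≤ 0, zero met by the backwards walk; ¬ D forces k < 0
    have hk0 : k ≠ 0 := by
      intro h0
      apply hnd
      refine ⟨h0, ?_⟩
      subst h0
      simpa using hmem
    rw [check_neg_zero ((xs.length : Int) + k).toNat xs k hk rfl hmem, check_alt]
    obtain ⟨j, rfl⟩ : ∃ j : Nat, k = -(j : Int) := ⟨(-k).toNat, by omega⟩
    rw [PySem.List.slice_to_neg_natCast xs j (by omega)]
    have hlen : xs.length - j = (((xs.length : Int)) + -(j : Int)).toNat := by omega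
    rw [hlen]
    symm
    apply List.all_eq_false.2
    exact ⟨0, hmem, by simp⟩

-- ===== VERDICT (by name: the statements are the Claim_ definitions above) =====
theorem check_spec : Claim_unchanged_check := by
  intro xs k _ hpre hnd
  exact check_spec' xs k hpre hnd

theorem check_changed : Claim_changed_check := by
  unfold Claim_changed_check
  refine ⟨by decide, by decide, by decide, ?_, by decide, by decide⟩
  show check [0] 0 = false
  exact check_neg_zero 1 [0] 0 (by omega) (by norm_num) (by decide)

theorem check_tight : Claim_exact_check := by
  intro xs k _ _ hd
  rcases hd with ⟨rfl, hmem⟩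
  have hA : check xs 0 = false := by
    apply check_neg_zero xs.length xs 0 (by omega) (by omega)
    rw [List.take_length]; exact hmem
  have hB : check_alt xs 0 = true := by
    rw [check_alt, PySem.List.slice_to xs (by omega : (0:Int) ≤ 0)]
    simp
  rw [hA, hB]; simp
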